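-- pv_equiv track=rewrite | github.com/bhornung11/bhornung11.github.io | assets/airline-names-01/scripts/encoding.py | encode_name_by_token_marker
-- ===== SOURCE A (Python) =====
-- from typing import (
--     Dict,
--     List,
--     Sequence,
--     Set,
--     Tuple
-- )
--
-- def encode_name_by_token_marker(
--         name: str,
--         tokens: Sequence[str],
--         markers: Sequence[str]
--     ) -> Tuple[str]:
--     """
--     Encodes a name using tokens and markers. Token is an entire word.
--     A fragment is an incomplete word.
--
--     Parameters:
--         name: str,
--         tokens: Sequence[str],
--         markers: Sequence[str]
--     """
--
--     encoded = []
--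
--     for word in name.split():
--
--         if word in tokens or word in markers:
--             encoded.append("T")
--             continue
--
--         if _starts_with_from_set(word, markers):
--             encoded.append("t")
--
--             if _ends_with_from_set(word, markers):
--                 encoded.append("t")
--                 continue
--
--             encoded.append("s")
--             continue
--
--         if _ends_with_from_set(word, markers):
--             encoded.append("s")
--             encoded.append("t")
--             continue
--
--         encoded.append("S")
--
--     encoded = tuple(encoded)
--
--     return encoded
--
-- def _ends_with_from_set(string, strings):
--
--     for str_ in strings:
--         if string.endswith(str_):
--             return True
--     return False
--
-- def _starts_with_from_set(string, strings):
--
--     for str_ in strings: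
--         if string.startswith(str_):
--             return True
--     return False
-- ===== SOURCE B (Python) =====
-- def encode_name_by_token_marker(name, tokens, markers):
--     """Encode each word: set lookups on the word's own (length-bounded)
--     prefixes/suffixes replace the per-marker startswith/endswith scans."""
--     token_set = set(tokens)
--     marker_set = set(markers)
--     maxlen = max(map(len, markers), default=0)
--     encoded = []
--     for word in name.split():
--         if word in token_set or word in marker_set:
--             encoded.append("T")
--             continue
--         n = len(word)
--         starts = any(word[:k] in marker_set for k in range(min(n, maxlen) + 1))
--         ends = any(word[k:] in marker_set for k in range(max(0, n - maxlen), n + 1))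
--         if starts and ends:
--             encoded.extend(("t", "t"))
--         elif starts:
--             encoded.extend(("t", "s"))
--         elif ends:
--             encoded.extend(("s", "t"))
--         else:
--             encoded.append("S")
--     return tuple(encoded)
-- ===== Notes on version B (the rewrite author's own statement) =====
-- stated objective: alternative
-- what changed: Instead of scanning the marker list with startswith/endswith for every word, B builds token/marker hash sets and the maximum marker length once, and tests each word's length-bounded prefixes and suffixes by set membership.
import Mathlib
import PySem

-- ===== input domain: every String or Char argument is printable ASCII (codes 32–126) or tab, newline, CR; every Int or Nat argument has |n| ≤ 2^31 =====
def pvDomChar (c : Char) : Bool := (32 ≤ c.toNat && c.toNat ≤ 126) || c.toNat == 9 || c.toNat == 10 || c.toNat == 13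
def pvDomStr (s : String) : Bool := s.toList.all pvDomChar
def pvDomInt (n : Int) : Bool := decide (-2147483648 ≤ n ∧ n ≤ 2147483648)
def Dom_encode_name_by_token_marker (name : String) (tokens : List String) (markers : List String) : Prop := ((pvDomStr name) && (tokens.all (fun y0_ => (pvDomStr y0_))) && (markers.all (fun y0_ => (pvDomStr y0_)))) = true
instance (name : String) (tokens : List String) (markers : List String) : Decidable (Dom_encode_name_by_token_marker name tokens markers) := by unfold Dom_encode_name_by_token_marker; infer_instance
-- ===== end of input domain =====

-- B replaces A's per-marker startswith/endswith scans by set lookups on the word's own length-bounded prefixes/suffixes (objective: alternative algorithm).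

-- ===== PORT A =====
def pvEndsWithFromSet (string : String) (strings : List String) : Bool :=
  match strings with
  | [] => false
  | str_ :: rest =>
      if PySem.Str.endswith string str_ then true
      else pvEndsWithFromSet string rest

def pvStartsWithFromSet (string : String) (strings : List String) : Bool :=
  match strings with
  | [] => false
  | str_ :: rest =>
      if PySem.Str.startswith string str_ then true
      else pvStartsWithFromSet string rest

def encode_name_by_token_marker (name : String) (tokens : List String) (markers : List String) : List String :=
  (PySem.Str.split₀ name).foldl
    (fun encoded word =>
      if tokens.contains word || markers.contains word then encoded ++ ["T"]
      else if pvStartsWithFromSet word markers then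
        if pvEndsWithFromSet word markers then (encoded ++ ["t"]) ++ ["t"]
        else (encoded ++ ["t"]) ++ ["s"]
      else if pvEndsWithFromSet word markers then (encoded ++ ["s"]) ++ ["t"]
      else encoded ++ ["S"]) []

-- ===== PORT B =====
-- max(map(len, markers), default=0), ported as a fold (lengths are ≥ 0, so folding from 0 is Python's max-with-default)
def pvMaxLen (markers : List String) : Int :=
  markers.foldl (fun acc m => max acc (PySem.Str.len m)) 0

def pvWordCodeB (markerSet : PySem.Set String) (tokenSet : PySem.Set String) (maxlen : Int) (word : String) : List String :=
  if PySem.Set.contains tokenSet word || PySem.Set.contains markerSet word then ["T"]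
  else
    let n := PySem.Str.len word
    let starts := (PySem.List.pyRange 0 (min n maxlen + 1)).any
      (fun k => PySem.Set.contains markerSet (PySem.Str.slice word none (some k)))
    let ends := (PySem.List.pyRange (max 0 (n - maxlen)) (n + 1)).any
      (fun k => PySem.Set.contains markerSet (PySem.Str.slice word (some k) none))
    if starts && ends then ["t", "t"]
    else if starts then ["t", "s"]
    else if ends then ["s", "t"]
    else ["S"]

def encode_name_by_token_marker_alt (name : String) (tokens : List String) (markers : List String) : List String :=
  let tokenSet : PySem.Set String := PySem.Set.ofList tokens
  let markerSet : PySem.Set String := PySem.Set.ofList markers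
  let maxlen : Int := pvMaxLen markers
  ((PySem.Str.split₀ name).map (pvWordCodeB markerSet tokenSet maxlen)).flatten

-- ===== PRECONDITION & SPEC =====
def Spec_encode_name_by_token_marker (name : String) (tokens : List String) (markers : List String) (out : List String) : Prop := out = encode_name_by_token_marker_alt name tokens markers
instance (name : String) (tokens : List String) (markers : List String) (out : List String) : Decidable (Spec_encode_name_by_token_marker name tokens markers out) := by unfold Spec_encode_name_by_token_marker; infer_instance

-- ===== CLAIM (what is proved, stated in full; the proofs are below) =====
def Claim_equal_encode_name_by_token_marker : Prop := ∀ (name : String) (tokens : List String) (markers : List String), Dom_encode_name_by_token_marker name tokens markers → Spec_encode_name_by_token_marker name tokens markers (encode_name_by_token_marker name tokens markers)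

-- ===== LEMMAS AND PROOFS =====

theorem pvContains_ofList (l : List String) (w : String) :
    PySem.Set.contains (PySem.Set.ofList l) w = l.contains w := by
  rw [Bool.eq_iff_iff]; simp [PySem.Set.contains, PySem.Set.mem_ofList]

theorem pvStarts_any (word : String) (l : List String) :
    pvStartsWithFromSet word l = l.any (fun m => PySem.Str.startswith word m) := by
  induction l with
  | nil => rfl
  | cons m rest ih =>
    rw [pvStartsWithFromSet, List.any_cons, ih]
    cases PySem.Str.startswith word m <;> simp

theorem pvEnds_any (word : String) (l : List String) :
    pvEndsWithFromSet word l = l.any (fun m => PySem.Str.endswith word m) := by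
  induction l with
  | nil => rfl
  | cons m rest ih =>
    rw [pvEndsWithFromSet, List.any_cons, ih]
    cases PySem.Str.endswith word m <;> simp

theorem pvFoldMax_init (l : List String) : ∀ a : Int, a ≤ l.foldl (fun acc m => max acc (PySem.Str.len m)) a := by
  induction l with
  | nil => intro a; simp
  | cons m rest ih =>
    intro a
    simpa using le_trans (le_max_left a (PySem.Str.len m)) (ih (max a (PySem.Str.len m)))

theorem pvMaxLen_ge (markers : List String) (m : String) (hm : m ∈ markers) :
    PySem.Str.len m ≤ pvMaxLen markers := by
  unfold pvMaxLen
  generalize (0 : Int) = a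
  induction markers generalizing a with
  | nil => simp at hm
  | cons m' rest ih =>
    rcases List.mem_cons.mp hm with h | h
    · subst h
      simpa using le_trans (le_max_right a (PySem.Str.len m)) (pvFoldMax_init rest _)
    · simpa using ih h _

theorem pvStarts_eq (word : String) (markers : List String) :
    pvStartsWithFromSet word markers =
      (PySem.List.pyRange 0 (min (PySem.Str.len word) (pvMaxLen markers) + 1)).any
        (fun k => PySem.Set.contains (PySem.Set.ofList markers) (PySem.Str.slice word none (some k))) := by
  rw [Bool.eq_iff_iff, pvStarts_any]
  simp only [List.any_eq_true]
  constructor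
  · rintro ⟨m, hm, hpre⟩
    rw [PySem.Str.startswith_eq, PySem.Chars.startswith_iff] at hpre
    refine ⟨(m.toList.length : Int), ?_, ?_⟩
    · rw [PySem.List.mem_pyRange_one]
      have h1 := hpre.length_le
      have h2 := pvMaxLen_ge markers m hm
      refine ⟨Int.natCast_nonneg _, ?_⟩
      simp only [PySem.Str.len] at h2 ⊢; omega
    · have htl : (PySem.Str.slice word none (some (m.toList.length : Int))).toList = m.toList := by
        rw [PySem.Str.toList_slice, PySem.Chars.slice_eq_listSlice,
          PySem.List.slice_to _ (Int.natCast_nonneg _)]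
        simpa using (List.prefix_iff_eq_take.mp hpre).symm
      have heq : PySem.Str.slice word none (some (m.toList.length : Int)) = m :=
        String.toList_inj.mp htl
      rw [heq, pvContains_ofList]
      simpa using hm
  · rintro ⟨k, hk, hmem⟩
    rw [PySem.List.mem_pyRange_one] at hk
    rw [pvContains_ofList] at hmem
    have hmem' : PySem.Str.slice word none (some k) ∈ markers := by simpa using hmem
    refine ⟨PySem.Str.slice word none (some k), hmem', ?_⟩
    rw [PySem.Str.startswith_eq, PySem.Chars.startswith_iff,
      PySem.Str.toList_slice, PySem.Chars.slice_eq_listSlice,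
      PySem.List.slice_to _ hk.1]
    exact List.take_prefix _ _

theorem pvEnds_eq (word : String) (markers : List String) :
    pvEndsWithFromSet word markers =
      (PySem.List.pyRange (max 0 (PySem.Str.len word - pvMaxLen markers)) (PySem.Str.len word + 1)).any
        (fun k => PySem.Set.contains (PySem.Set.ofList markers) (PySem.Str.slice word (some k) none)) := by
  rw [Bool.eq_iff_iff, pvEnds_any]
  simp only [List.any_eq_true]
  constructor
  · rintro ⟨m, hm, hsuf⟩
    rw [PySem.Str.endswith_eq, PySem.Chars.endswith_iff] at hsuf
    obtain ⟨t, ht⟩ := hsuf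
    have hlen : t.length + m.toList.length = word.toList.length := by
      rw [← ht]; simp
    refine ⟨(t.length : Int), ?_, ?_⟩
    · rw [PySem.List.mem_pyRange_one]
      have h2 := pvMaxLen_ge markers m hm
      simp only [PySem.Str.len] at h2 ⊢
      constructor <;> omega
    · have htl : (PySem.Str.slice word (some (t.length : Int)) none).toList = m.toList := by
        rw [PySem.Str.toList_slice, PySem.Chars.slice_eq_listSlice,
          PySem.List.slice_from _ (Int.natCast_nonneg _)]
        simp [← ht]
      have heq : PySem.Str.slice word (some (t.length : Int)) none = m :=
        String.toList_inj.mp htl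
      rw [heq, pvContains_ofList]
      simpa using hm
  · rintro ⟨k, hk, hmem⟩
    rw [PySem.List.mem_pyRange_one] at hk
    rw [pvContains_ofList] at hmem
    have hmem' : PySem.Str.slice word (some k) none ∈ markers := by simpa using hmem
    refine ⟨PySem.Str.slice word (some k) none, hmem', ?_⟩
    rw [PySem.Str.endswith_eq, PySem.Chars.endswith_iff,
      PySem.Str.toList_slice, PySem.Chars.slice_eq_listSlice,
      PySem.List.slice_from _ (le_trans (le_max_left 0 _) hk.1)]
    exact List.drop_suffix _ _

theorem pvStep_abs (acc : List String) (T s e : Bool) :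
    (if T then acc ++ ["T"]
      else if s then (if e then (acc ++ ["t"]) ++ ["t"] else (acc ++ ["t"]) ++ ["s"])
      else if e then (acc ++ ["s"]) ++ ["t"]
      else acc ++ ["S"])
    = acc ++ (if T then ["T"] else if s && e then ["t", "t"]
        else if s then ["t", "s"] else if e then ["s", "t"] else ["S"]) := by
  cases T <;> cases s <;> cases e <;> simp

theorem pvStep_eq (tokens markers : List String) (acc : List String) (word : String) :
    (if tokens.contains word || markers.contains word then acc ++ ["T"]
      else if pvStartsWithFromSet word markers then
        if pvEndsWithFromSet word markers then (acc ++ ["t"]) ++ ["t"]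
        else (acc ++ ["t"]) ++ ["s"]
      else if pvEndsWithFromSet word markers then (acc ++ ["s"]) ++ ["t"]
      else acc ++ ["S"])
    = acc ++ pvWordCodeB (PySem.Set.ofList markers) (PySem.Set.ofList tokens) (pvMaxLen markers) word := by
  rw [← pvContains_ofList tokens word, ← pvContains_ofList markers word,
    pvStarts_eq, pvEnds_eq]
  exact pvStep_abs acc _ _ _

theorem pvFold_eq (tokens markers : List String) (ws : List String) :
    ∀ acc : List String,
      ws.foldl
        (fun encoded word =>
          if tokens.contains word || markers.contains word then encoded ++ ["T"]
          else if pvStartsWithFromSet word markers then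
            if pvEndsWithFromSet word markers then (encoded ++ ["t"]) ++ ["t"]
            else (encoded ++ ["t"]) ++ ["s"]
          else if pvEndsWithFromSet word markers then (encoded ++ ["s"]) ++ ["t"]
          else encoded ++ ["S"]) acc
      = acc ++ (ws.map (pvWordCodeB (PySem.Set.ofList markers) (PySem.Set.ofList tokens) (pvMaxLen markers))).flatten := by
  induction ws with
  | nil => intro acc; simp
  | cons w ws ih =>
    intro acc
    simp only [List.foldl_cons, List.map_cons, List.flatten_cons]
    rw [pvStep_eq, ih, List.append_assoc]

-- ===== VERDICT (by name: the statement is the Claim_ definition above) =====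
theorem encode_name_by_token_marker_spec : Claim_equal_encode_name_by_token_marker := by
  intro name tokens markers _
  unfold Spec_encode_name_by_token_marker encode_name_by_token_marker encode_name_by_token_marker_alt
  rw [pvFold_eq]
  simp
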